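-- pv_equiv track=rewrite | github.com/inteldict/pzeug | number/number.py | circulars
-- ===== SOURCE A (Python) =====
-- from collections import deque
--
-- def circulars(digits):
--     digits = deque(digits)
--     length = len(digits)
--     for i in range(1, length):
--         digits.rotate(1)
--         degree = 0
--         digit_sum = 0
--         for digit in digits:
--             digit_sum += digit * 10 ** degree
--             degree += 1
--         yield digit_sum
-- ===== SOURCE B (Python) =====
-- def circulars(digits):
--     n = len(digits)
--     v = 0
--     for d in reversed(digits):
--         v = v * 10 + d
--     p = 10 ** (n - 1) if n else 0
--     for x in reversed(digits[1:]):
--         v = x + 10 * (v - x * p)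
--         yield v
-- ===== Notes on version B (the rewrite author's own statement) =====
-- stated objective: faster
-- what changed: B keeps a running place-value total (Horner seed, then an O(1) closed-form update per rotation: v' = x + 10*(v - x*10^(n-1))) instead of re-summing digit*10^degree over the whole deque for every rotation.
import Mathlib
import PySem

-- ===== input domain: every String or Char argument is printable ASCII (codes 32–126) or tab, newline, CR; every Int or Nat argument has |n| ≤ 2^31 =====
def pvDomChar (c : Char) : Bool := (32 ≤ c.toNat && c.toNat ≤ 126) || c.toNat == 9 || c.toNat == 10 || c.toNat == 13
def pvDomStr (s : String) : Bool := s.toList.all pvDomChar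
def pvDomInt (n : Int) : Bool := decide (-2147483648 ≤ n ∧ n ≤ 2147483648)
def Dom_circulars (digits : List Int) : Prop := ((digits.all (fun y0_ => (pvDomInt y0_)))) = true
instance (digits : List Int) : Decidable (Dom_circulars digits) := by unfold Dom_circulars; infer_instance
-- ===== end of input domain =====

-- B replaces A's per-rotation O(n) re-summation by a running total updated in O(1) per rotation (measured asymptotically faster).

-- ===== PORT A =====
-- deque.rotate(1): move the last element to the front (no-op on the empty deque)
def pvRotate1 (xs : List Int) : List Int :=
  match xs.getLast? with
  | none => xs
  | some x => x :: xs.dropLast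

-- the inner 'for digit in digits' loop: digit_sum and degree accumulated left to right
def pvInnerSum (xs : List Int) : Int :=
  (xs.foldl (fun (acc : Int × Nat) digit => (acc.1 + digit * 10 ^ acc.2, acc.2 + 1)) (0, 0)).1

-- the outer 'for i in range(1, length)' loop, collecting the yields; k = iterations left
def pvALoop (ds : List Int) (k : Nat) : List Int :=
  match k with
  | 0 => []
  | k + 1 =>
    let ds' := pvRotate1 ds
    pvInnerSum ds' :: pvALoop ds' k

def circulars (digits : List Int) : List Int :=
  pvALoop digits (digits.length - 1)

-- ===== PORT B =====
-- 'for x in reversed(digits[1:])', updating the running value v and collecting the yields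
def pvBLoop (p : Int) (xs : List Int) (v : Int) : List Int :=
  match xs with
  | [] => []
  | x :: rest =>
    let v' := x + 10 * (v - x * p)
    v' :: pvBLoop p rest v'

def circulars_alt (digits : List Int) : List Int :=
  let n := digits.length
  let v := digits.reverse.foldl (fun v d => v * 10 + d) 0
  let p : Int := if n = 0 then 0 else 10 ^ (n - 1)
  pvBLoop p ((digits.drop 1).reverse) v

-- ===== PRECONDITION & SPEC =====
def Spec_circulars (digits : List Int) (out : List Int) : Prop := out = circulars_alt digits
instance (digits : List Int) (out : List Int) : Decidable (Spec_circulars digits out) := by unfold Spec_circulars; infer_instance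

-- ===== CLAIM (what is proved, stated in full; the proofs are below) =====
def Claim_equal_circulars : Prop := ∀ (digits : List Int), Dom_circulars digits → Spec_circulars digits (circulars digits)

-- ===== LEMMAS AND PROOFS =====

-- place value of a list read as digits, least-significant first
def pvVal (e : List Int) : Int := e.foldr (fun d a => a * 10 + d) 0

theorem pvVal_cons (x : Int) (ys : List Int) : pvVal (x :: ys) = (pvVal ys) * 10 + x := rfl

theorem pvInnerSum_aux (e : List Int) (s : Int) (k : Nat) :
    (e.foldl (fun (acc : Int × Nat) digit => (acc.1 + digit * 10 ^ acc.2, acc.2 + 1)) (s, k)).1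
      = s + 10 ^ k * pvVal e := by
  induction e generalizing s k with
  | nil => simp [pvVal]
  | cons x e ih =>
    simp only [List.foldl_cons, ih, pvVal_cons, pow_succ]
    ring

theorem pvInnerSum_eq (e : List Int) : pvInnerSum e = pvVal e := by
  simpa using pvInnerSum_aux e 0 0

theorem pvVal_concat (ys : List Int) (x : Int) :
    pvVal (ys ++ [x]) = pvVal ys + x * 10 ^ ys.length := by
  induction ys with
  | nil => simp [pvVal]
  | cons y ys ih =>
    simp only [List.cons_append, pvVal_cons, ih, List.length_cons, pow_succ]
    ring

theorem pvRotate1_concat (ys : List Int) (x : Int) :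
    pvRotate1 (ys ++ [x]) = x :: ys := by
  simp [pvRotate1]

-- main invariant: deque = rot ++ front (front nonempty, starting with the original head);
-- A still rotates out front's tail, B still consumes (front.drop 1).reverse, v = value of the deque
theorem pvLoop_eq (front : List Int) :
    ∀ (rot : List Int) (p : Int), front ≠ [] →
      p = 10 ^ ((rot ++ front).length - 1) →
      pvALoop (rot ++ front) (front.length - 1)
        = pvBLoop p ((front.drop 1).reverse) (pvVal (rot ++ front)) := by
  induction front using List.reverseRecOn with
  | nil => intro _ _ h _; exact absurd rfl h
  | append_singleton front' x ih =>
    intro rot p _ hp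
    match front' with
    | [] => simp [pvALoop, pvBLoop]
    | f :: fr =>
      have hfront' : (f :: fr) ≠ [] := by simp
      have hlen : ((f :: fr) ++ [x]).length - 1 = ((f :: fr).length - 1) + 1 := by
        simp
      rw [hlen]
      have hrw : rot ++ ((f :: fr) ++ [x]) = (rot ++ (f :: fr)) ++ [x] := by
        simp
      have hk : pvRotate1 (rot ++ ((f :: fr) ++ [x])) = x :: (rot ++ (f :: fr)) := by
        rw [hrw, pvRotate1_concat]
      have hdrop : (((f :: fr) ++ [x]).drop 1).reverse = x :: ((f :: fr).drop 1).reverse := by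
        simp
      have hlen2 : (rot ++ (f :: fr)).length = (rot ++ ((f :: fr) ++ [x])).length - 1 := by
        simp
      have hval : pvVal (x :: (rot ++ (f :: fr)))
          = x + 10 * (pvVal (rot ++ ((f :: fr) ++ [x])) - x * p) := by
        rw [hrw, pvVal_concat, pvVal_cons, hp, hlen2]
        ring
      simp only [pvALoop, hk, hdrop, pvBLoop]
      rw [pvInnerSum_eq, hval]
      have := ih (x :: rot) p hfront' (by rw [hp]; congr 1; simp)
      simp only [List.cons_append] at this ⊢
      rw [this, hval]
      simp only [List.cons_append]

theorem pvHorner (digits : List Int) :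
    digits.reverse.foldl (fun v d => v * 10 + d) 0 = pvVal digits := by
  rw [List.foldl_reverse]
  rfl

theorem circulars_spec_aux (digits : List Int) :
    circulars digits = circulars_alt digits := by
  match digits with
  | [] => rfl
  | d :: ds =>
    unfold circulars circulars_alt
    rw [pvHorner]
    have := pvLoop_eq (d :: ds) [] (10 ^ ((d :: ds).length - 1)) (by simp) (by simp)
    simpa using this

-- ===== VERDICT (by name: the statement is the Claim_ definition above) =====
theorem circulars_spec : Claim_equal_circulars := by
  intro digits _
  unfold Spec_circulars
  exact circulars_spec_aux digits
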